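-- pv_equiv track=rewrite | github.com/Widmerpool/Graceful-Trees | grace.py | poll
-- ===== SOURCE A (Python) =====
-- def make(n):
--     deck=[]
--     for i in range(1,n):
--         for j in range(1,min(1+n-i,n)):
--             deck.append((i,j))
--     return deck
--
-- def poll(n):
--     hands=[[],[]]
--     deck=make(n)
--     for card in deck:
--         hands[1].append([card])
--     while hands[-1]!=[]:
--         hands.append([])
--         for hand in hands[-2]:
--             for card in deck:
--                 if valid(card,hand):
--                     hands[-1].append(hand+[card])
--     s=len(hands)-1
--     return hands[:s]
--
-- def valid(card,hand):
-- 	for other in hand: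
-- 		if card[0] < other[0] or card[1]  in other or card[0] in other:
-- 			return False
-- 	return True
-- ===== SOURCE B (Python) =====
-- def valid(card, hand):
--     for other in hand:
--         if card[0] < other[0] or card[1] in other or card[0] in other:
--             return False
--     return True
--
-- def poll(n):
--     deck = [(i, j) for i in range(1, n) for j in range(1, n - i + 1)]
--
--     # DFS preorder over all valid hands, in deck order at each node.
--     def dfs(hand):
--         out = []
--         for card in deck:
--             if valid(card, hand):
--                 h2 = hand + [card]
--                 out.append(h2)
--                 out.extend(dfs(h2))
--         return out
--
--     pre = dfs([])
--     depth = 0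
--     for h in pre:
--         depth = max(depth, len(h))
--     return [[]] + [[h for h in pre if len(h) == k] for k in range(1, depth + 1)]
-- ===== Notes on version B (the rewrite author's own statement) =====
-- stated objective: alternative
-- what changed: A grows the level lists breadth-first with a while loop over a mutable hands list and drops the trailing empty level; B does a depth-first recursion that collects every valid hand once in preorder and then buckets the preorder list by hand length, relying on DFS preorder within a depth coinciding with BFS level order.
import Mathlib
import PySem

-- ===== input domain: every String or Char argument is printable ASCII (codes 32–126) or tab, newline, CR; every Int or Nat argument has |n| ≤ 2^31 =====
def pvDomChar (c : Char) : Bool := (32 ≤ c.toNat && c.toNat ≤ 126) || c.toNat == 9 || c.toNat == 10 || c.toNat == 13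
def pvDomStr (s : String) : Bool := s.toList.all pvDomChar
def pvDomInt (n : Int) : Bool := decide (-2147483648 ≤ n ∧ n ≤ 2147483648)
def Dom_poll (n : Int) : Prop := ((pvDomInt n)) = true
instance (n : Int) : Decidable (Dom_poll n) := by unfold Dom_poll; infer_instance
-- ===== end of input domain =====

-- B replaces A's BFS level-by-level expansion with a DFS that collects all valid hands in
-- preorder and then buckets them by length (objective: alternative decomposition, same cost).

-- ===== PORT A =====
-- make(n): nested appending loops
def pvMake (n : Int) : List (Int × Int) :=
  (PySem.List.pyRange 1 n 1).foldl (fun deck i =>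
    (PySem.List.pyRange 1 (min (1 + n - i) n) 1).foldl (fun d j => d ++ [(i, j)]) deck) []

-- valid(card, hand): early-return loop over hand ≡ List.all of the negated test
def pvValid (card : Int × Int) (hand : List (Int × Int)) : Bool :=
  hand.all (fun other =>
    !(card.1 < other.1 || card.2 == other.1 || card.2 == other.2
      || card.1 == other.1 || card.1 == other.2))

-- body of A's while loop: the new level hands[-1] built from hands[-2]
def pvStep (deck : List (Int × Int)) (level : List (List (Int × Int))) :
    List (List (Int × Int)) :=
  level.foldl (fun acc hand =>
    deck.foldl (fun acc2 card =>
      if pvValid card hand then acc2 ++ [hand ++ [card]] else acc2) acc) []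

-- A's while loop ('append [], then fill hands[-1] from hands[-2]' ≡ append the new level built
-- from the old last level).  The fuel only makes the loop total; deck.length + 2 iterations
-- provably suffice (pvTermination below), so the port is exact.
def pvLoopA (deck : List (Int × Int)) :
    Nat → List (List (List (Int × Int))) → List (List (List (Int × Int)))
  | 0, hands => hands
  | f + 1, hands =>
    if hands.getLastD [] ≠ [] then
      pvLoopA deck f (hands ++ [pvStep deck (hands.getLastD [])])
    else hands

def poll (n : Int) : List (List (List (Int × Int))) :=
  let deck := pvMake n
  let hands := [[], deck.foldl (fun acc card => acc ++ [[card]]) []]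
  let hands := pvLoopA deck (deck.length + 2) hands
  hands.take (hands.length - 1)

-- ===== PORT B =====
def pvDeckB (n : Int) : List (Int × Int) :=
  (PySem.List.pyRange 1 n 1).flatMap (fun i =>
    (PySem.List.pyRange 1 (n - i + 1) 1).map (fun j => (i, j)))

-- Source B's dfs(hand): the preorder list of all valid extensions of hand.  The fuel only makes
-- the recursion total; the recursion depth is provably < deck.length + 2, so the port is exact.
def pvDfs (deck : List (Int × Int)) : Nat → List (Int × Int) → List (List (Int × Int))
  | 0, _ => []
  | f + 1, hand =>
    deck.foldl (fun out card =>
      if pvValid card hand then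
        out ++ [hand ++ [card]] ++ pvDfs deck f (hand ++ [card])
      else out) []

def poll_alt (n : Int) : List (List (List (Int × Int))) :=
  let deck := pvDeckB n
  let pre := pvDfs deck (deck.length + 2) []
  let depth : Nat := pre.foldl (fun m h => max m h.length) 0
  [[]] ++ (PySem.List.pyRange 1 ((depth : Int) + 1) 1).map (fun k =>
    pre.filter (fun h => (h.length : Int) == k))

-- ===== PRECONDITION & SPEC =====
def Spec_poll (n : Int) (out : List (List (List (Int × Int)))) : Prop := out = poll_alt n
instance (n : Int) (out : List (List (List (Int × Int)))) : Decidable (Spec_poll n out) := by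
  unfold Spec_poll; infer_instance

-- ===== CLAIM (what is proved, stated in full; the proofs are below) =====
def Claim_equal_poll : Prop := ∀ (n : Int), Dom_poll n → Spec_poll n (poll n)

-- ===== LEMMAS AND PROOFS =====

-- children of a hand, in deck order
def pvChl (deck : List (Int × Int)) (hand : List (Int × Int)) : List (List (Int × Int)) :=
  (deck.filter (fun c => pvValid c hand)).map (fun c => hand ++ [c])

-- k-fold level expansion
def pvIter (deck : List (Int × Int)) : Nat → List (List (Int × Int)) → List (List (Int × Int))
  | 0, L => L
  | k + 1, L => pvIter deck k (L.flatMap (pvChl deck))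

-- the raw chain of levels A's loop appends
def pvChainRaw (deck : List (Int × Int)) :
    Nat → List (List (Int × Int)) → List (List (List (Int × Int)))
  | 0, _ => []
  | f + 1, L => if L = [] then [] else pvStep deck L :: pvChainRaw deck f (pvStep deck L)

-- the chain of nonempty levels produced from L (common canonical form)
def pvChainNE (deck : List (Int × Int)) :
    Nat → List (List (Int × Int)) → List (List (List (Int × Int)))
  | 0, _ => []
  | f + 1, L => if L = [] then [] else L :: pvChainNE deck f (L.flatMap (pvChl deck))

-- the number of nonempty levels produced from L
def pvDepth (deck : List (Int × Int)) : Nat → List (List (Int × Int)) → Nat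
  | 0, _ => 0
  | f + 1, L => if L = [] then 0 else pvDepth deck f (L.flatMap (pvChl deck)) + 1

-- hands reachable at level k: no repeated value, cards from the deck, length k
def pvGood (deck : List (Int × Int)) (k : Nat) (h : List (Int × Int)) : Prop :=
  h.Nodup ∧ (∀ c ∈ h, c ∈ deck) ∧ h.length = k

theorem pvIter_succ' (deck : List (Int × Int)) (k : Nat) (L : List (List (Int × Int))) :
    pvIter deck (k + 1) L = (pvIter deck k L).flatMap (pvChl deck) := by
  induction k generalizing L with
  | zero => simp [pvIter]
  | succ k ih => rw [pvIter, ih, pvIter]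

theorem pvIter_nil_mono (deck : List (Int × Int)) {m i : Nat}
    (L : List (List (Int × Int))) (h : pvIter deck m L = []) (hmi : m ≤ i) :
    pvIter deck i L = [] := by
  induction i with
  | zero => have : m = 0 := by omega
            rw [← this]; exact h
  | succ i ih =>
    rcases Nat.lt_or_ge m (i + 1) with hlt | hge
    · rw [pvIter_succ', ih (by omega)]; rfl
    · have : m = i + 1 := by omega
      rw [← this]; exact h

theorem pvStep_eq (deck : List (Int × Int)) (L : List (List (Int × Int))) :
    pvStep deck L = L.flatMap (pvChl deck) := by
  unfold pvStep
  have h2 : L.foldl (fun acc hand => deck.foldl (fun acc2 card =>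
        if pvValid card hand then acc2 ++ [hand ++ [card]] else acc2) acc) []
      = L.foldl (fun acc hand => acc ++ pvChl deck hand) [] := by
    apply PySem.List.foldl_congr_mem
    intro acc hand _
    rw [PySem.List.foldl_append_if]; rfl
  rw [h2, PySem.List.foldl_append_eq_flatMap]; rfl

theorem pvLoopA_eq (deck : List (Int × Int)) (f : Nat) :
    ∀ (pre : List (List (List (Int × Int)))) (L : List (List (Int × Int))),
    pvLoopA deck f (pre ++ [L]) = pre ++ [L] ++ pvChainRaw deck f L := by
  induction f with
  | zero => intro pre L; simp [pvLoopA, pvChainRaw]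
  | succ f ih =>
    intro pre L
    rw [pvLoopA]
    simp only [List.getLastD_concat]
    by_cases hL : L = []
    · simp [hL, pvChainRaw]
    · simp only [hL, ne_eq, not_false_eq_true, if_pos]
      have := ih (pre ++ [L]) (pvStep deck L)
      rw [List.append_assoc] at *
      rw [this, pvChainRaw, if_neg hL]
      simp

theorem pvChainRaw_eq (deck : List (Int × Int)) (f : Nat) :
    ∀ (L : List (List (Int × Int))), pvIter deck f L = [] →
    L :: pvChainRaw deck f L = pvChainNE deck f L ++ [[]] := by
  induction f with
  | zero => intro L h; rw [pvIter] at h; simp [h, pvChainRaw, pvChainNE]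
  | succ f ih =>
    intro L h
    by_cases hL : L = []
    · simp [hL, pvChainRaw, pvChainNE]
    · rw [pvChainRaw, if_neg hL, pvChainNE, if_neg hL]
      have : pvIter deck f (L.flatMap (pvChl deck)) = [] := by
        rw [pvIter] at h; exact h
      have h2 := ih (L.flatMap (pvChl deck)) this
      rw [pvStep_eq, h2]
      rfl

theorem pvChainNE_eq_range (deck : List (Int × Int)) (f : Nat) :
    ∀ (L : List (List (Int × Int))),
    pvChainNE deck f L = (List.range (pvDepth deck f L)).map (fun i => pvIter deck i L) := by
  induction f with
  | zero => intro L; simp [pvChainNE, pvDepth]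
  | succ f ih =>
    intro L
    by_cases hL : L = []
    · simp [hL, pvChainNE, pvDepth]
    · rw [pvChainNE, if_neg hL, pvDepth, if_neg hL, List.range_succ_eq_map]
      rw [ih (L.flatMap (pvChl deck))]
      simp only [List.map_cons, List.map_map]
      constructor
    
theorem pvDepth_spec (deck : List (Int × Int)) (f : Nat) :
    ∀ (L : List (List (Int × Int))), pvIter deck f L = [] →
    pvIter deck (pvDepth deck f L) L = [] ∧
      (∀ i, i < pvDepth deck f L → pvIter deck i L ≠ []) := by
  induction f with
  | zero => intro L h
            rw [pvIter] at h
            refine ⟨by simpa [pvDepth, pvIter] using h, by simp [pvDepth]⟩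
  | succ f ih =>
    intro L h
    by_cases hL : L = []
    · refine ⟨by simp [pvDepth, hL, pvIter], by simp [pvDepth, hL]⟩
    · rw [pvIter] at h
      obtain ⟨h1, h2⟩ := ih (L.flatMap (pvChl deck)) h
      rw [pvDepth, if_neg hL]
      refine ⟨by rw [pvIter]; exact h1, ?_⟩
      intro i hi
      cases i with
      | zero => simpa [pvIter] using hL
      | succ i => rw [pvIter]; exact h2 i (by omega)

-- ===== the termination bound: hands are nodup sublists of the deck =====

theorem pvValid_not_mem (card : Int × Int) (hand : List (Int × Int))
    (h : pvValid card hand = true) : card ∉ hand := by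
  intro hmem
  unfold pvValid at h
  rw [List.all_eq_true] at h
  have := h card hmem
  simp at this

theorem pvChl_good (deck : List (Int × Int)) (k : Nat) (h : List (Int × Int))
    (hg : pvGood deck k h) :
    ∀ h2 ∈ pvChl deck h, pvGood deck (k + 1) h2 := by
  intro h2 hh2
  unfold pvChl at hh2
  rw [List.mem_map] at hh2
  obtain ⟨c, hc, rfl⟩ := hh2
  rw [List.mem_filter] at hc
  obtain ⟨hcd, hcv⟩ := hc
  obtain ⟨hnd, hsub, hlen⟩ := hg
  refine ⟨?_, ?_, ?_⟩
  · rw [List.nodup_append]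
    refine ⟨hnd, List.nodup_singleton c, ?_⟩
    intro x hx y hy
    rw [List.mem_singleton] at hy
    intro heq
    exact pvValid_not_mem c h hcv (by rwa [heq, hy] at hx)
  · intro x hx
    rw [List.mem_append, List.mem_singleton] at hx
    rcases hx with hx | rfl
    · exact hsub x hx
    · exact hcd
  · simp [hlen]

theorem pvIter_good (deck : List (Int × Int)) (k : Nat) :
    ∀ (d : Nat) (L : List (List (Int × Int))), (∀ h ∈ L, pvGood deck d h) →
    ∀ h ∈ pvIter deck k L, pvGood deck (d + k) h := by
  induction k with
  | zero => intro d L hL h hh; rw [pvIter] at hh; simpa using hL h hh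
  | succ k ih =>
    intro d L hL h hh
    rw [pvIter] at hh
    have : ∀ h2 ∈ L.flatMap (pvChl deck), pvGood deck (d + 1) h2 := by
      intro h2 hh2
      rw [List.mem_flatMap] at hh2
      obtain ⟨h0, hh0, hh2⟩ := hh2
      exact pvChl_good deck d h0 (hL h0 hh0) h2 hh2
    have := ih (d + 1) (L.flatMap (pvChl deck)) this h hh
    have e : d + 1 + k = d + (k + 1) := by omega
    rwa [e] at this

theorem pvGood_length_le (deck : List (Int × Int)) (k : Nat) (h : List (Int × Int))
    (hg : pvGood deck k h) : k ≤ deck.length := by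
  obtain ⟨hnd, hsub, hlen⟩ := hg
  have h1 : h.toFinset.card = h.length := List.toFinset_card_of_nodup hnd
  have h2 : h.toFinset ⊆ deck.toFinset := by
    intro x hx
    rw [List.mem_toFinset] at *
    exact hsub x hx
  have := Finset.card_le_card h2
  have := List.toFinset_card_le deck
  omega

theorem pvTermination (deck : List (Int × Int)) :
    pvIter deck (deck.length + 1) (pvChl deck []) = [] := by
  by_cases h : pvIter deck (deck.length + 1) (pvChl deck []) = []
  · exact h
  · exfalso
    obtain ⟨x, hx⟩ := List.exists_mem_of_ne_nil _ h
    have hg : ∀ h2 ∈ pvChl deck [], pvGood deck 1 h2 :=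
      pvChl_good deck 0 [] ⟨List.nodup_nil, by simp, rfl⟩
    have := pvIter_good deck (deck.length + 1) 1 (pvChl deck []) hg x hx
    have := pvGood_length_le deck _ x this
    omega

-- ===== the DFS side =====

theorem pvDfs_succ (deck : List (Int × Int)) (f : Nat) (hand : List (Int × Int)) :
    pvDfs deck (f + 1) hand =
      (deck.filter (fun c => pvValid c hand)).flatMap
        (fun c => (hand ++ [c]) :: pvDfs deck f (hand ++ [c])) := by
  rw [pvDfs]
  suffices hgen : ∀ (d : List (Int × Int)) (acc : List (List (Int × Int))),
      d.foldl (fun out card =>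
        if pvValid card hand then out ++ [hand ++ [card]] ++ pvDfs deck f (hand ++ [card])
        else out) acc
      = acc ++ (d.filter (fun c => pvValid c hand)).flatMap
          (fun c => (hand ++ [c]) :: pvDfs deck f (hand ++ [c])) by
    simpa using hgen deck []
  intro d
  induction d with
  | nil => intro acc; simp
  | cons c d ih =>
    intro acc
    rw [List.foldl_cons, List.filter_cons]
    by_cases hc : pvValid c hand = true
    · rw [if_pos hc, if_pos hc, ih, List.flatMap_cons]
      simp [List.append_assoc]
    · rw [if_neg hc, if_neg hc, ih]

theorem pvDfs_len_lb (deck : List (Int × Int)) (f : Nat) :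
    ∀ (hand : List (Int × Int)) (x : List (Int × Int)), x ∈ pvDfs deck f hand →
    hand.length < x.length := by
  induction f with
  | zero => intro hand x hx; simp [pvDfs] at hx
  | succ f ih =>
    intro hand x hx
    rw [pvDfs_succ, List.mem_flatMap] at hx
    obtain ⟨c, _, hx⟩ := hx
    rw [List.mem_cons] at hx
    rcases hx with rfl | hx
    · simp
    · have := ih (hand ++ [c]) x hx
      simp at this
      omega

-- filter distributes over flatMap
theorem pvFilter_flatMap {a b : Type} (l : List a) (g : a → List b) (P : b → Bool) :
    (l.flatMap g).filter P = l.flatMap (fun a => (g a).filter P) := by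
  induction l with
  | nil => rfl
  | cons a l ih => simp [List.flatMap_cons, List.filter_append, ih]

theorem pvFlatMap_congr {a b : Type} (l : List a) (f g : a → List b)
    (h : ∀ x ∈ l, f x = g x) : l.flatMap f = l.flatMap g := by
  induction l with
  | nil => rfl
  | cons a l ih =>
    simp only [List.flatMap_cons]
    rw [h a (by simp), ih (fun a ha => h a (by simp [ha]))]

theorem pvDfs_len_ub (deck : List (Int × Int)) (f : Nat) :
    ∀ (hand : List (Int × Int)) (x : List (Int × Int)), x ∈ pvDfs deck f hand →
    x.length ≤ hand.length + f := by
  induction f with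
  | zero => intro hand x hx; simp [pvDfs] at hx
  | succ f ih =>
    intro hand x hx
    rw [pvDfs_succ, List.mem_flatMap] at hx
    obtain ⟨c, _, hx⟩ := hx
    rw [List.mem_cons] at hx
    rcases hx with rfl | hx
    · simp
    · have := ih (hand ++ [c]) x hx
      simp at this
      omega

-- DFS preorder filtered to one depth = BFS level of that depth
theorem pvKey (deck : List (Int × Int)) (f : Nat) :
    ∀ (j d : Nat) (hs : List (List (Int × Int))), (∀ h ∈ hs, h.length = d) → j < f →
    (hs.flatMap (fun h => pvDfs deck f h)).filter (fun x => x.length == d + 1 + j)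
      = pvIter deck j (hs.flatMap (pvChl deck)) := by
  induction f with
  | zero => intro j d hs _ hj; omega
  | succ f ih =>
    intro j d hs hlen hj
    have expand : (hs.flatMap (fun h => pvDfs deck (f + 1) h)).filter
          (fun x => x.length == d + 1 + j)
        = hs.flatMap (fun h =>
            ((deck.filter (fun c => pvValid c h)).flatMap
              (fun c => (h ++ [c]) :: pvDfs deck f (h ++ [c]))).filter
                (fun x => x.length == d + 1 + j)) := by
      rw [pvFilter_flatMap]
      exact pvFlatMap_congr _ _ _ (fun h _ => by rw [pvDfs_succ])
    rw [expand]
    cases j with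
    | zero =>
      have inner : ∀ h ∈ hs,
          ((deck.filter (fun c => pvValid c h)).flatMap
            (fun c => (h ++ [c]) :: pvDfs deck f (h ++ [c]))).filter
              (fun x => x.length == d + 1 + 0)
          = pvChl deck h := by
        intro h hh
        rw [pvFilter_flatMap]
        unfold pvChl
        rw [List.map_eq_flatMap]
        apply pvFlatMap_congr
        intro c _
        rw [List.filter_cons]
        have hhd : (h ++ [c]).length == d + 1 + 0 := by
          simp [hlen h hh]
        rw [if_pos hhd]
        have : (pvDfs deck f (h ++ [c])).filter (fun x => x.length == d + 1 + 0) = [] := by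
          rw [List.filter_eq_nil_iff]
          intro x hx
          have h1 := pvDfs_len_lb deck f (h ++ [c]) x hx
          simp [hlen h hh] at h1 ⊢
          omega
        rw [this]
      rw [pvFlatMap_congr _ _ _ inner]
      rfl
    | succ j =>
      have inner : ∀ h ∈ hs,
          ((deck.filter (fun c => pvValid c h)).flatMap
            (fun c => (h ++ [c]) :: pvDfs deck f (h ++ [c]))).filter
              (fun x => x.length == d + 1 + (j + 1))
          = (pvChl deck h).flatMap
              (fun h2 => (pvDfs deck f h2).filter (fun x => x.length == d + 1 + (j + 1))) := by
        intro h hh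
        rw [pvFilter_flatMap]
        unfold pvChl
        rw [List.flatMap_map]
        apply pvFlatMap_congr
        intro c _
        rw [List.filter_cons]
        have hhd : ¬((h ++ [c]).length == d + 1 + (j + 1)) = true := by
          simp [hlen h hh]
        rw [if_neg hhd]
      rw [pvFlatMap_congr _ _ _ inner, ← List.flatMap_assoc]
      have hlen2 : ∀ h2 ∈ hs.flatMap (pvChl deck), h2.length = d + 1 := by
        intro h2 hh2
        rw [List.mem_flatMap] at hh2
        obtain ⟨h, hh, hh2⟩ := hh2
        unfold pvChl at hh2
        rw [List.mem_map] at hh2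
        obtain ⟨c, _, rfl⟩ := hh2
        simp [hlen h hh]
      have hpred : d + 1 + (j + 1) = (d + 1) + 1 + j := by omega
      rw [hpred, ← pvFilter_flatMap, ih j (d + 1) (hs.flatMap (pvChl deck)) hlen2 (by omega)]
      rw [pvIter]

-- fold-max helpers
theorem pvFoldMax_le (l : List (List (Int × Int))) :
    ∀ (a b : Nat), a ≤ b → (∀ x ∈ l, x.length ≤ b) →
    l.foldl (fun m h => max m h.length) a ≤ b := by
  induction l with
  | nil => intro a b hab _; simpa using hab
  | cons x l ih =>
    intro a b hab hxs
    rw [List.foldl_cons]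
    exact ih _ b (by have := hxs x (by simp); omega) (fun y hy => hxs y (by simp [hy]))

theorem pvFoldMax_base (l : List (List (Int × Int))) :
    ∀ (a : Nat), a ≤ l.foldl (fun m h => max m h.length) a := by
  induction l with
  | nil => intro a; simp
  | cons y l ih =>
    intro a
    rw [List.foldl_cons]
    exact le_trans (le_max_left _ _) (ih _)

theorem pvFoldMax_ge (l : List (List (Int × Int))) :
    ∀ (a : Nat) (x : List (Int × Int)), x ∈ l →
    x.length ≤ l.foldl (fun m h => max m h.length) a := by
  induction l with
  | nil => intro a x hx; simp at hx
  | cons y l ih =>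
    intro a x hx
    rw [List.foldl_cons]
    rcases List.mem_cons.mp hx with rfl | hx
    · exact le_trans (le_max_right _ _) (pvFoldMax_base l _)
    · exact ih _ x hx

-- the two decks coincide (for i ≥ 1, min(1+n-i, n) = 1+n-i = n-i+1)
theorem pvDeck_eq (n : Int) : pvDeckB n = pvMake n := by
  unfold pvMake pvDeckB
  have step1 : (PySem.List.pyRange 1 n 1).foldl (fun deck i =>
      (PySem.List.pyRange 1 (min (1 + n - i) n) 1).foldl (fun d j => d ++ [(i, j)]) deck) []
      = (PySem.List.pyRange 1 n 1).foldl (fun deck i =>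
          deck ++ (PySem.List.pyRange 1 (min (1 + n - i) n) 1).map (fun j => (i, j))) [] := by
    apply PySem.List.foldl_congr_mem
    intro acc i _
    rw [PySem.List.foldl_append_singleton_eq_map]
  rw [step1, PySem.List.foldl_append_eq_flatMap, List.nil_append]
  apply pvFlatMap_congr
  intro i hi
  rw [PySem.List.mem_pyRange_one] at hi
  have h1 : min (1 + n - i) n = 1 + n - i := by omega
  have h2 : n - i + 1 = 1 + n - i := by omega
  rw [h1, h2]

-- ===== A in canonical form =====
theorem pvPollA_eq (n : Int) :
    poll n = [] :: pvChainNE (pvMake n) ((pvMake n).length + 2) (pvChl (pvMake n) []) := by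
  have hH : pvIter (pvMake n) ((pvMake n).length + 2) (pvChl (pvMake n) []) = [] :=
    pvIter_nil_mono (pvMake n) _ (pvTermination (pvMake n)) (by omega)
  have hloop := pvLoopA_eq (pvMake n) ((pvMake n).length + 2) [[]] (pvChl (pvMake n) [])
  have hraw := pvChainRaw_eq (pvMake n) ((pvMake n).length + 2) (pvChl (pvMake n) []) hH
  have hinit : (pvMake n).foldl (fun acc card => acc ++ [[card]]) []
      = pvChl (pvMake n) [] := by
    rw [PySem.List.foldl_append_singleton_eq_map]
    unfold pvChl
    simp [pvValid]
  unfold poll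
  simp only [hinit]
  have e1 : ([[], pvChl (pvMake n) []] : List (List (List (Int × Int))))
      = [[]] ++ [pvChl (pvMake n) []] := rfl
  rw [e1, hloop, List.append_assoc]
  have e2 : [pvChl (pvMake n) []] ++
        pvChainRaw (pvMake n) ((pvMake n).length + 2) (pvChl (pvMake n) [])
      = pvChainNE (pvMake n) ((pvMake n).length + 2) (pvChl (pvMake n) []) ++ [[]] := by
    rw [List.singleton_append, hraw]
  rw [e2, ← List.append_assoc]
  have hlen : (([[]] ++ pvChainNE (pvMake n) ((pvMake n).length + 2) (pvChl (pvMake n) []))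
        ++ [[]]).length - 1
      = ([[]] ++ pvChainNE (pvMake n) ((pvMake n).length + 2) (pvChl (pvMake n) [])).length := by
    simp
  rw [hlen, List.take_left]
  rfl

-- ===== B in canonical form =====
theorem pvPollB_eq (n : Int) :
    poll_alt n = [] :: pvChainNE (pvMake n) ((pvMake n).length + 2) (pvChl (pvMake n) []) := by
  unfold poll_alt
  simp only [pvDeck_eq]
  have hH : pvIter (pvMake n) ((pvMake n).length + 2) (pvChl (pvMake n) []) = [] :=
    pvIter_nil_mono (pvMake n) _ (pvTermination (pvMake n)) (by omega)
  obtain ⟨hm1, hm2⟩ := pvDepth_spec (pvMake n) ((pvMake n).length + 2) (pvChl (pvMake n) []) hH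
  set deck := pvMake n with hdeck
  set F := deck.length + 2 with hF
  set L1 := pvChl deck [] with hL1
  set m := pvDepth deck F L1 with hmdef
  set pre := pvDfs deck F [] with hpre
  -- the key correspondence, specialised to the root
  have hfilter : ∀ j, j < F →
      pre.filter (fun x => x.length == 0 + 1 + j) = pvIter deck j L1 := by
    intro j hj
    have := pvKey deck F j 0 [[]] (by simp) hj
    simpa [hL1] using this
  have hmF : m ≤ F := by
    by_contra hmF
    exact hm2 F (by omega) hH
  -- every element of pre has length between 1 and F
  have hlb : ∀ x ∈ pre, 1 ≤ x.length := by
    intro x hx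
    have := pvDfs_len_lb deck F [] x hx
    simpa using this
  have hub : ∀ x ∈ pre, x.length ≤ F := by
    intro x hx
    have := pvDfs_len_ub deck F [] x hx
    simpa using this
  -- every element of pre has length ≤ m
  have hlm : ∀ x ∈ pre, x.length ≤ m := by
    intro x hx
    by_contra hgt
    rw [not_le] at hgt
    have h1 := hlb x hx
    have h2 := hub x hx
    have hj : x.length - 1 < F := by omega
    have hx2 : x ∈ pre.filter (fun y => y.length == 0 + 1 + (x.length - 1)) := by
      rw [List.mem_filter]
      exact ⟨hx, by simp; omega⟩
    rw [hfilter (x.length - 1) hj] at hx2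
    have hnil : pvIter deck (x.length - 1) L1 = [] :=
      pvIter_nil_mono deck L1 hm1 (by omega)
    rw [hnil] at hx2
    simp at hx2
  -- the fold computes exactly m
  have hdepth : pre.foldl (fun m h => max m h.length) 0 = m := by
    apply le_antisymm
    · exact pvFoldMax_le pre 0 m (by omega) hlm
    · cases hm : m with
      | zero => omega
      | succ m' =>
        have hne : pvIter deck m' L1 ≠ [] := hm2 m' (by omega)
        obtain ⟨x, hx⟩ := List.exists_mem_of_ne_nil _ hne
        have hj : m' < F := by omega
        have hx2 : x ∈ pre.filter (fun y => y.length == 0 + 1 + m') := by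
          rw [hfilter m' hj]; exact hx
        rw [List.mem_filter] at hx2
        obtain ⟨hx3, hx4⟩ := hx2
        have hx5 : x.length = m' + 1 := by
          simp at hx4
          omega
        have := pvFoldMax_ge pre 0 x hx3
        omega
  rw [hdepth]
  -- turn the pyRange-comprehension into the canonical chain
  have hrange : PySem.List.pyRange 1 ((m : Int) + 1) 1
      = (List.range m).map (fun k : Nat => (1 : Int) + (k : Int)) := by
    rw [PySem.List.pyRange_one]
    have e : ((m : Int) + 1 - 1).toNat = m := by omega
    rw [e]
  rw [hrange, List.map_map]
  have hmap : (List.range m).map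
        ((fun k => pre.filter (fun h => (h.length : Int) == k)) ∘ (fun k : Nat => (1 : Int) + (k : Int)))
      = (List.range m).map (fun i => pvIter deck i L1) := by
    apply List.map_congr_left
    intro i hi
    rw [List.mem_range] at hi
    have hpr : ∀ h : List (Int × Int),
        ((h.length : Int) == (1 : Int) + i) = (h.length == 0 + 1 + i) := by
      intro h
      rw [Bool.eq_iff_iff]
      simp
      omega
    show pre.filter (fun h => (h.length : Int) == (1 : Int) + i) = _
    rw [List.filter_congr (fun h _ => hpr h)]
    exact hfilter i (by omega)
  rw [hmap, ← pvChainNE_eq_range]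
  rfl

-- ===== VERDICT (by name: the statement is the Claim_ definition above) =====
theorem poll_spec : Claim_equal_poll := by
  intro n _
  unfold Spec_poll
  rw [pvPollA_eq, pvPollB_eq]
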